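-- pv_equiv track=rewrite | github.com/avlnx/hackerrank-solutions | hash_maps/count_triplets.py | count_invalid_first_positions
-- ===== SOURCE A (Python) =====
-- def count_invalid_first_positions(first_positions, second_position):
--     invalid = 0
--     i = -1
--     while True:
--         try:
--             n = first_positions[i]
--         except IndexError:
--             break
--         if n > second_position:
--             invalid += 1
--             i -= 1
--             continue
--         break
--     return invalid
-- ===== SOURCE B (Python) =====
-- def count_invalid_first_positions(first_positions, second_position):
--     # single forward pass: remember the index of the last element not exceeding
--     # the threshold; everything after it is the invalid trailing run
--     last_ok = -1
--     for i, n in enumerate(first_positions):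
--         if n <= second_position:
--             last_ok = i
--     return len(first_positions) - 1 - last_ok
-- ===== Notes on version B (the rewrite author's own statement) =====
-- stated objective: alternative
-- what changed: A walks backwards from index -1 with a try/except IndexError loop counting elements above the threshold; B makes one forward pass recording the last index whose value is <= the threshold and returns len-1-last_ok by arithmetic.
import Mathlib
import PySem

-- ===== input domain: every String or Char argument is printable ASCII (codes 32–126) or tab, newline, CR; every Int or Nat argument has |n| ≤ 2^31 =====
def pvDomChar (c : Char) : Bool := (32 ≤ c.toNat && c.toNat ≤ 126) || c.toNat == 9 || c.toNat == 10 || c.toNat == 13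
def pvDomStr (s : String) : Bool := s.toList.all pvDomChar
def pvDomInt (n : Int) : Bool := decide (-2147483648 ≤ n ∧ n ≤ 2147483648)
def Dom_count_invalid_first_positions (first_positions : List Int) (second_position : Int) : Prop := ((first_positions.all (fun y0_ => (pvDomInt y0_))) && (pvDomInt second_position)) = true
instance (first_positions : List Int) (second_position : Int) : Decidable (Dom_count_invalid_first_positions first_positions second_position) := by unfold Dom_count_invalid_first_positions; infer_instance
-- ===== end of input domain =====

-- B replaces A's backwards try/except walk by one forward pass recording the last
-- index whose value is <= the threshold and returning len-1-last_ok (alternative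
-- decomposition, same O(n) cost).

-- ===== PORT A =====
-- A's while-True loop: i starts at -1 and decreases; the try/except IndexError is the
-- InRange check (pyGet? = some ↔ InRange), the looked-up element is pyGetD.
def pvLoopA (first_positions : List Int) (second_position : Int) (invalid : Int) (i : Int) : Int :=
  if h : PySem.Raise.InRange first_positions.length i then
    if PySem.List.pyGetD first_positions i 0 > second_position then
      pvLoopA first_positions second_position (invalid + 1) (i - 1)
    else invalid
  else invalid
termination_by (i + first_positions.length + 1).toNat
decreasing_by
  simp only [PySem.Raise.InRange] at h
  omega

def count_invalid_first_positions (first_positions : List Int) (second_position : Int) : Int :=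
  pvLoopA first_positions second_position 0 (-1)

-- ===== PORT B =====
def count_invalid_first_positions_alt (first_positions : List Int) (second_position : Int) : Int :=
  let last_ok : Int :=
    (PySem.List.enumerate first_positions).foldl
      (fun acc p => if p.2 ≤ second_position then p.1 else acc) (-1)
  (first_positions.length : Int) - 1 - last_ok

-- ===== PRECONDITION & SPEC =====
def Spec_count_invalid_first_positions (first_positions : List Int) (second_position : Int) (out : Int) : Prop := out = count_invalid_first_positions_alt first_positions second_position
instance (first_positions : List Int) (second_position : Int) (out : Int) : Decidable (Spec_count_invalid_first_positions first_positions second_position out) := by unfold Spec_count_invalid_first_positions; infer_instance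

-- ===== CLAIM (what is proved, stated in full; the proofs are below) =====
def Claim_equal_count_invalid_first_positions : Prop := ∀ (first_positions : List Int) (second_position : Int), Dom_count_invalid_first_positions first_positions second_position → Spec_count_invalid_first_positions first_positions second_position (count_invalid_first_positions first_positions second_position)

-- ===== LEMMAS AND PROOFS =====

-- appending one element on the right shifts A's negative-index walk by one
theorem pvLoopA_shift (xs : List Int) (x sp inv : Int) :
    ∀ j : Int, j ≤ -1 → pvLoopA (xs ++ [x]) sp inv (j - 1) = pvLoopA xs sp inv j := by
  intro j hj
  induction hn : (j + xs.length + 1).toNat using Nat.strong_induction_on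
    generalizing j inv with
  | _ n ih =>
    conv_lhs => rw [pvLoopA]
    conv_rhs => rw [pvLoopA]
    by_cases hr : PySem.Raise.InRange xs.length j
    · obtain ⟨h1, h2⟩ := hr
      have hr' : PySem.Raise.InRange (xs ++ [x]).length (j - 1) := by
        simp only [PySem.Raise.InRange, List.length_append, List.length_cons,
          List.length_nil]
        push_cast; omega
      rw [dif_pos hr', dif_pos ⟨h1, h2⟩]
      have e : PySem.List.pyGetD (xs ++ [x]) (j - 1) 0 = PySem.List.pyGetD xs j 0 := by
        obtain ⟨k, hk0, hkl, rfl⟩ : ∃ k : Nat, 0 < k ∧ k ≤ xs.length ∧ j = -(k : Int) :=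
          ⟨(-j).toNat, by omega, by omega, by omega⟩
        have e1 : PySem.List.pyGetD xs (-(k : Int)) 0 = xs[xs.length - k]'(by omega) :=
          PySem.List.pyGetD_neg_natCast xs k 0 hk0 hkl
        have hj1 : (-(k : Int)) - 1 = -(((k + 1 : Nat)) : Int) := by push_cast; ring
        rw [hj1, e1,
          PySem.List.pyGetD_neg_natCast (xs ++ [x]) (k + 1) 0 (by omega)
            (by simp only [List.length_append, List.length_cons, List.length_nil]; omega)]
        have hlen : (xs ++ [x]).length - (k + 1) = xs.length - k := by simp only [List.length_append, List.length_cons, List.length_nil]; omega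
        rw [List.getElem_append_left (by omega)]
        simp only [hlen]
      rw [e]
      split
      · exact ih _ (by omega) (inv + 1) (j - 1) (by omega) rfl
      · rfl
    · have hr' : ¬ PySem.Raise.InRange (xs ++ [x]).length (j - 1) := by
        simp only [PySem.Raise.InRange, List.length_append, List.length_cons,
          List.length_nil] at hr ⊢
        push_cast at hr ⊢; omega
      rw [dif_neg hr', dif_neg hr]

-- the accumulator is additive
theorem pvLoopA_add (xs : List Int) (sp : Int) :
    ∀ (i inv : Int), pvLoopA xs sp inv i = inv + pvLoopA xs sp 0 i := by
  intro i inv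
  induction hn : (i + xs.length + 1).toNat using Nat.strong_induction_on
    generalizing i inv with
  | _ n ih =>
    conv_lhs => rw [pvLoopA]
    conv_rhs => rw [pvLoopA]
    by_cases hr : PySem.Raise.InRange xs.length i
    · obtain ⟨h1, h2⟩ := hr
      rw [dif_pos ⟨h1, h2⟩, dif_pos ⟨h1, h2⟩]
      split
      · rw [ih _ (by omega) (i - 1) (inv + 1) rfl, ih _ (by omega) (i - 1) (0 + 1) rfl]
        ring
      · omega
    · rw [dif_neg hr, dif_neg hr]; omega

-- A's recurrence on snoc
theorem countA_concat (xs : List Int) (x sp : Int) :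
    count_invalid_first_positions (xs ++ [x]) sp =
      if x > sp then 1 + count_invalid_first_positions xs sp else 0 := by
  unfold count_invalid_first_positions
  conv_lhs => rw [pvLoopA]
  have hr : PySem.Raise.InRange (xs ++ [x]).length (-1) := by
    simp only [PySem.Raise.InRange, List.length_append, List.length_cons,
      List.length_nil]
    push_cast; omega
  rw [dif_pos hr, PySem.List.pyGetD_neg_one_append_singleton]
  split
  · rw [pvLoopA_shift xs x sp (0 + 1) (-1) (by omega), pvLoopA_add xs sp (-1) (0 + 1)]
    ring
  · rfl

theorem enumerate_append_int (xs ys : List Int) :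
    ∀ s : Int, PySem.List.enumerate (xs ++ ys) s
      = PySem.List.enumerate xs s ++ PySem.List.enumerate ys (s + xs.length) := by
  induction xs with
  | nil => intro s; simp [PySem.List.enumerate_nil]
  | cons a t ih =>
    intro s
    simp only [List.cons_append, PySem.List.enumerate_cons, ih (s + 1), List.length_cons]
    congr 3
    push_cast; ring

-- B's recurrence on snoc
theorem countB_concat (xs : List Int) (x sp : Int) :
    count_invalid_first_positions_alt (xs ++ [x]) sp =
      if x > sp then 1 + count_invalid_first_positions_alt xs sp else 0 := by
  unfold count_invalid_first_positions_alt
  rw [enumerate_append_int xs [x] 0, List.foldl_append]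
  simp only [PySem.List.enumerate_cons, PySem.List.enumerate_nil, List.foldl_cons,
    List.foldl_nil, List.length_append, List.length_cons, List.length_nil, zero_add]
  by_cases h : x > sp
  · rw [if_pos h, if_neg (by omega)]
    push_cast; ring
  · rw [if_neg h, if_pos (by omega)]
    push_cast; ring

theorem count_main (fp : List Int) (sp : Int) :
    count_invalid_first_positions fp sp = count_invalid_first_positions_alt fp sp := by
  induction fp using List.reverseRecOn with
  | nil =>
    unfold count_invalid_first_positions count_invalid_first_positions_alt
    rw [pvLoopA]
    simp [PySem.Raise.InRange, PySem.List.enumerate_nil]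
  | append_singleton xs x ih =>
    rw [countA_concat, countB_concat, ih]

-- ===== VERDICT (by name: the statement is the Claim_ definition above) =====
theorem count_invalid_first_positions_spec : Claim_equal_count_invalid_first_positions :=
  fun fp sp _ => count_main fp sp
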